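-- pv_equiv track=rewrite | github.com/brianstm/NUS | CS1010E/PE1/Practice/20-21 Sem 1/Question3.py | calculate_areas
-- ===== SOURCE A (Python) =====
-- def calculate_areas(w_list, h_list):
--     # Initialize the variables for each color
--     white, yellow, red = 0, 0, 0
--     # Create a dictionary to store the heights for each color
--     color_dict = {i: 0 for i in range(3)}
--
--     # Loop through the height list and add the heights to the corresponding color in the dictionary
--     for i in range(len(h_list)):
--         color_dict[i % 3] += h_list[i]
--
--     for i in range(len(w_list)):
--         # Calculate the offset to ensure the colors are distributed evenly
--         offset = i % 3
--         # Calculate the area for each color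
--         white += w_list[i] * color_dict[(i + offset) % 3]
--         yellow += w_list[i] * color_dict[(i + 1 + offset) % 3]
--         red += w_list[i] * color_dict[(i + 2 + offset) % 3]
--
--     # Return the calculated areas
--     return (white, yellow, red)
-- ===== SOURCE B (Python) =====
-- def calculate_areas(w_list, h_list):
--     # Group heights by index mod 3 (same bucketing A's dict performs).
--     h_sums = [0, 0, 0]
--     for i, h in enumerate(h_list):
--         h_sums[i % 3] += h
--     # Group widths by (2*i) % 3: since offset = i % 3, (i + offset) % 3 == (2*i) % 3.
--     w_sums = [0, 0, 0]
--     for i, w in enumerate(w_list):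
--         w_sums[2 * i % 3] += w
--     # Constant-size 3x3 combine instead of A's per-element triple product loop.
--     white = yellow = red = 0
--     for k in range(3):
--         white += w_sums[k] * h_sums[k]
--         yellow += w_sums[k] * h_sums[(k + 1) % 3]
--         red += w_sums[k] * h_sums[(k + 2) % 3]
--     return (white, yellow, red)
-- ===== Notes on version B (the rewrite author's own statement) =====
-- stated objective: faster
-- what changed: A's per-element loop multiplying each width by three dict lookups is replaced by a second grouping pass (width sums bucketed by (2*i)%3, using (i + i%3)%3 == (2*i)%3) followed by a constant-size 3x3 combine of the two grouped-sum tables.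
import Mathlib
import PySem

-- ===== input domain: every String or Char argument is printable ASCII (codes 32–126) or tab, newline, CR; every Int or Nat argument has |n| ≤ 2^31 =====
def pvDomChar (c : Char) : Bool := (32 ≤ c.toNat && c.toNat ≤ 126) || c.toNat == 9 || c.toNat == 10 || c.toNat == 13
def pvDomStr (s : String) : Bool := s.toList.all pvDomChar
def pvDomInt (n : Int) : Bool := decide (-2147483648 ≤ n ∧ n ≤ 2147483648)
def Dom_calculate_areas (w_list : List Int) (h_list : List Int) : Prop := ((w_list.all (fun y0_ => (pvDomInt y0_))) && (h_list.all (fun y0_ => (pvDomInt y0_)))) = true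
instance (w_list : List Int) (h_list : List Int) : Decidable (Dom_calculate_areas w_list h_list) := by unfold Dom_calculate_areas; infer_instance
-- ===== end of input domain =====

-- B replaces A's per-element triple-product loop by a width-grouping pass plus a
-- constant 3x3 combine (measured constant-factor speedup; exact on integers).

-- ===== PORT A =====
-- for i in range(len(h_list)): color_dict[i % 3] += h_list[i]
-- (the index loop reads exactly h_list[i], so it is the structural recursion over
-- h_list carrying i; `d[k] += h` is Dict.modify — the key k = i % 3 is always one
-- of the dict's keys 0,1,2, so the default 0 is never used and this is exact)
def pvA_hloop : PySem.Dict Int Int → Int → List Int → PySem.Dict Int Int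
  | d, _, [] => d
  | d, i, h :: rest => pvA_hloop (d.modify (PySem.Int.mod i 3) 0 (· + h)) (i + 1) rest

-- for i in range(len(w_list)): offset = i % 3; white += w_list[i] * color_dict[(i+offset)%3]; …
-- (d[k] with k = (i+offset)%3 ∈ {0,1,2}, always a key of d, so getD is exact)
def pvA_wloop : Int × Int × Int → Int → PySem.Dict Int Int → List Int → Int × Int × Int
  | acc, _, _, [] => acc
  | (wh, ye, re), i, d, w :: rest =>
    let offset := PySem.Int.mod i 3
    pvA_wloop
      (wh + w * d.getD (PySem.Int.mod (i + offset) 3) 0,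
       ye + w * d.getD (PySem.Int.mod (i + 1 + offset) 3) 0,
       re + w * d.getD (PySem.Int.mod (i + 2 + offset) 3) 0) (i + 1) d rest

def calculate_areas (w_list : List Int) (h_list : List Int) : Int × Int × Int :=
  -- color_dict = {i: 0 for i in range(3)}
  let color_dict : PySem.Dict Int Int := PySem.Dict.ofList [(0, 0), (1, 0), (2, 0)]
  pvA_wloop (0, 0, 0) 0 (pvA_hloop color_dict 0 h_list) w_list

-- ===== PORT B =====
-- xs[r] += v for a 3-element list; every call site has 0 ≤ r < 3, so set/pyGetD are exact
def pvBump (xs : List Int) (r : Int) (v : Int) : List Int :=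
  xs.set r.toNat (PySem.List.pyGetD xs r 0 + v)

-- for i, h in enumerate(h_list): h_sums[i % 3] += h
def pvB_hloop : List Int → Int → List Int → List Int
  | s, _, [] => s
  | s, i, h :: rest => pvB_hloop (pvBump s (PySem.Int.mod i 3) h) (i + 1) rest

-- for i, w in enumerate(w_list): w_sums[2 * i % 3] += w
def pvB_wloop : List Int → Int → List Int → List Int
  | s, _, [] => s
  | s, i, w :: rest => pvB_wloop (pvBump s (PySem.Int.mod (2 * i) 3) w) (i + 1) rest

def calculate_areas_alt (w_list : List Int) (h_list : List Int) : Int × Int × Int :=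
  let h_sums := pvB_hloop [0, 0, 0] 0 h_list
  let w_sums := pvB_wloop [0, 0, 0] 0 w_list
  -- for k in range(3): white += w_sums[k]*h_sums[k]; yellow += …[(k+1)%3]; red += …[(k+2)%3]
  (PySem.List.pyRange 0 3 1).foldl
    (fun (acc : Int × Int × Int) k =>
      (acc.1 + PySem.List.pyGetD w_sums k 0 * PySem.List.pyGetD h_sums k 0,
       acc.2.1 + PySem.List.pyGetD w_sums k 0 * PySem.List.pyGetD h_sums (PySem.Int.mod (k + 1) 3) 0,
       acc.2.2 + PySem.List.pyGetD w_sums k 0 * PySem.List.pyGetD h_sums (PySem.Int.mod (k + 2) 3) 0))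
    (0, 0, 0)

-- ===== PRECONDITION & SPEC =====
def Spec_calculate_areas (w_list : List Int) (h_list : List Int) (out : Int × Int × Int) : Prop := out = calculate_areas_alt w_list h_list
instance (w_list : List Int) (h_list : List Int) (out : Int × Int × Int) : Decidable (Spec_calculate_areas w_list h_list out) := by unfold Spec_calculate_areas; infer_instance

-- ===== CLAIM (what is proved, stated in full; the proofs are below) =====
def Claim_equal_calculate_areas : Prop := ∀ (w_list : List Int) (h_list : List Int), Dom_calculate_areas w_list h_list → Spec_calculate_areas w_list h_list (calculate_areas w_list h_list)

-- ===== LEMMAS AND PROOFS =====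

theorem pv_get0 (xs : List Int) : PySem.List.pyGet? xs 0 = xs[0]? := by
  exact_mod_cast PySem.List.pyGet?_natCast xs 0
theorem pv_get1 (xs : List Int) : PySem.List.pyGet? xs 1 = xs[1]? := by
  exact_mod_cast PySem.List.pyGet?_natCast xs 1
theorem pv_get2 (xs : List Int) : PySem.List.pyGet? xs 2 = xs[2]? := by
  exact_mod_cast PySem.List.pyGet?_natCast xs 2

theorem pv_mod3_cases (i : Int) : PySem.Int.mod i 3 = i % 3 ∧ (i % 3 = 0 ∨ i % 3 = 1 ∨ i % 3 = 2) := by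
  refine ⟨PySem.Int.mod_eq_emod_of_pos (by norm_num), by omega⟩

-- A's height loop on the {0,1,2}-keyed dict computes exactly B's grouped sums
theorem pv_hloop_eq (hs : List Int) : ∀ (i a b c : Int),
    pvA_hloop (PySem.Dict.ofList [(0, a), (1, b), (2, c)]) i hs
      = PySem.Dict.ofList
          [(0, (pvB_hloop [a, b, c] i hs).getD 0 0),
           (1, (pvB_hloop [a, b, c] i hs).getD 1 0),
           (2, (pvB_hloop [a, b, c] i hs).getD 2 0)] := by
  induction hs with
  | nil => intro i a b c; simp [pvA_hloop, pvB_hloop]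
  | cons h rest ih =>
    intro i a b c
    obtain ⟨hm, h3⟩ := pv_mod3_cases i
    rcases h3 with h0 | h0 | h0 <;>
    · rw [show pvA_hloop (PySem.Dict.ofList [(0, a), (1, b), (2, c)]) i (h :: rest)
            = pvA_hloop ((PySem.Dict.ofList [(0, a), (1, b), (2, c)]).modify (PySem.Int.mod i 3) 0 (· + h)) (i + 1) rest from rfl,
          show pvB_hloop [a, b, c] i (h :: rest)
            = pvB_hloop (pvBump [a, b, c] (PySem.Int.mod i 3) h) (i + 1) rest from rfl,
          hm, h0]
      exact ih (i + 1) _ _ _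

-- A's width loop equals the 3x3 combine of B's grouped width sums
theorem pv_wloop_eq (ws : List Int) : ∀ (i t0 t1 t2 wh ye re s0 s1 s2 : Int),
    pvA_wloop (wh + (t0 * s0 + t1 * s1 + t2 * s2),
               ye + (t0 * s1 + t1 * s2 + t2 * s0),
               re + (t0 * s2 + t1 * s0 + t2 * s1)) i
        (PySem.Dict.ofList [(0, s0), (1, s1), (2, s2)]) ws
      = (wh + ((pvB_wloop [t0, t1, t2] i ws).getD 0 0 * s0
              + (pvB_wloop [t0, t1, t2] i ws).getD 1 0 * s1
              + (pvB_wloop [t0, t1, t2] i ws).getD 2 0 * s2),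
         ye + ((pvB_wloop [t0, t1, t2] i ws).getD 0 0 * s1
              + (pvB_wloop [t0, t1, t2] i ws).getD 1 0 * s2
              + (pvB_wloop [t0, t1, t2] i ws).getD 2 0 * s0),
         re + ((pvB_wloop [t0, t1, t2] i ws).getD 0 0 * s2
              + (pvB_wloop [t0, t1, t2] i ws).getD 1 0 * s0
              + (pvB_wloop [t0, t1, t2] i ws).getD 2 0 * s1)) := by
  induction ws with
  | nil => intro i t0 t1 t2 wh ye re s0 s1 s2; simp [pvA_wloop, pvB_wloop]
  | cons w rest ih =>
    intro i t0 t1 t2 wh ye re s0 s1 s2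
    obtain ⟨hm, h3⟩ := pv_mod3_cases i
    have hm2 : PySem.Int.mod (2 * i) 3 = (2 * i) % 3 := (pv_mod3_cases (2 * i)).1
    have hA : pvA_wloop (wh + (t0 * s0 + t1 * s1 + t2 * s2),
               ye + (t0 * s1 + t1 * s2 + t2 * s0),
               re + (t0 * s2 + t1 * s0 + t2 * s1)) i
               (PySem.Dict.ofList [(0, s0), (1, s1), (2, s2)]) (w :: rest)
            = pvA_wloop (wh + (t0 * s0 + t1 * s1 + t2 * s2)
                           + w * (PySem.Dict.ofList [(0, s0), (1, s1), (2, s2)]).getD (PySem.Int.mod (i + PySem.Int.mod i 3) 3) 0,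
                         ye + (t0 * s1 + t1 * s2 + t2 * s0)
                           + w * (PySem.Dict.ofList [(0, s0), (1, s1), (2, s2)]).getD (PySem.Int.mod (i + 1 + PySem.Int.mod i 3) 3) 0,
                         re + (t0 * s2 + t1 * s0 + t2 * s1)
                           + w * (PySem.Dict.ofList [(0, s0), (1, s1), (2, s2)]).getD (PySem.Int.mod (i + 2 + PySem.Int.mod i 3) 3) 0)
                 (i + 1) (PySem.Dict.ofList [(0, s0), (1, s1), (2, s2)]) rest := rfl
    have hB : pvB_wloop [t0, t1, t2] i (w :: rest)
            = pvB_wloop (pvBump [t0, t1, t2] (PySem.Int.mod (2 * i) 3) w) (i + 1) rest := rfl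
    rcases h3 with h0 | h0 | h0
    · -- i % 3 = 0 : A adds w*s0 / w*s1 / w*s2, B bumps bucket 0
      rw [hA, hm, h0, hB, hm2, show (2 * i) % 3 = 0 from by omega,
          show pvBump [t0, t1, t2] 0 w = [t0 + w, t1, t2] from rfl,
          show PySem.Int.mod (i + 0) 3 = 0 from by rw [(pv_mod3_cases _).1]; omega,
          show PySem.Int.mod (i + 1 + 0) 3 = 1 from by rw [(pv_mod3_cases _).1]; omega,
          show PySem.Int.mod (i + 2 + 0) 3 = 2 from by rw [(pv_mod3_cases _).1]; omega,
          show (PySem.Dict.ofList [((0:Int), s0), (1, s1), (2, s2)]).getD 0 0 = s0 from rfl,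
          show (PySem.Dict.ofList [((0:Int), s0), (1, s1), (2, s2)]).getD 1 0 = s1 from rfl,
          show (PySem.Dict.ofList [((0:Int), s0), (1, s1), (2, s2)]).getD 2 0 = s2 from rfl,
          show wh + (t0 * s0 + t1 * s1 + t2 * s2) + w * s0
             = wh + ((t0 + w) * s0 + t1 * s1 + t2 * s2) from by ring,
          show ye + (t0 * s1 + t1 * s2 + t2 * s0) + w * s1
             = ye + ((t0 + w) * s1 + t1 * s2 + t2 * s0) from by ring,
          show re + (t0 * s2 + t1 * s0 + t2 * s1) + w * s2
             = re + ((t0 + w) * s2 + t1 * s0 + t2 * s1) from by ring]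
      exact ih (i + 1) (t0 + w) t1 t2 wh ye re s0 s1 s2
    · -- i % 3 = 1 : A adds w*s2 / w*s0 / w*s1, B bumps bucket 2
      rw [hA, hm, h0, hB, hm2, show (2 * i) % 3 = 2 from by omega,
          show pvBump [t0, t1, t2] 2 w = [t0, t1, t2 + w] from rfl,
          show PySem.Int.mod (i + 1) 3 = 2 from by rw [(pv_mod3_cases _).1]; omega,
          show PySem.Int.mod (i + 1 + 1) 3 = 0 from by rw [(pv_mod3_cases _).1]; omega,
          show PySem.Int.mod (i + 2 + 1) 3 = 1 from by rw [(pv_mod3_cases _).1]; omega,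
          show (PySem.Dict.ofList [((0:Int), s0), (1, s1), (2, s2)]).getD 0 0 = s0 from rfl,
          show (PySem.Dict.ofList [((0:Int), s0), (1, s1), (2, s2)]).getD 1 0 = s1 from rfl,
          show (PySem.Dict.ofList [((0:Int), s0), (1, s1), (2, s2)]).getD 2 0 = s2 from rfl,
          show wh + (t0 * s0 + t1 * s1 + t2 * s2) + w * s2
             = wh + (t0 * s0 + t1 * s1 + (t2 + w) * s2) from by ring,
          show ye + (t0 * s1 + t1 * s2 + t2 * s0) + w * s0
             = ye + (t0 * s1 + t1 * s2 + (t2 + w) * s0) from by ring,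
          show re + (t0 * s2 + t1 * s0 + t2 * s1) + w * s1
             = re + (t0 * s2 + t1 * s0 + (t2 + w) * s1) from by ring]
      exact ih (i + 1) t0 t1 (t2 + w) wh ye re s0 s1 s2
    · -- i % 3 = 2 : A adds w*s1 / w*s2 / w*s0, B bumps bucket 1
      rw [hA, hm, h0, hB, hm2, show (2 * i) % 3 = 1 from by omega,
          show pvBump [t0, t1, t2] 1 w = [t0, t1 + w, t2] from rfl,
          show PySem.Int.mod (i + 2) 3 = 1 from by rw [(pv_mod3_cases _).1]; omega,
          show PySem.Int.mod (i + 1 + 2) 3 = 2 from by rw [(pv_mod3_cases _).1]; omega,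
          show PySem.Int.mod (i + 2 + 2) 3 = 0 from by rw [(pv_mod3_cases _).1]; omega,
          show (PySem.Dict.ofList [((0:Int), s0), (1, s1), (2, s2)]).getD 0 0 = s0 from rfl,
          show (PySem.Dict.ofList [((0:Int), s0), (1, s1), (2, s2)]).getD 1 0 = s1 from rfl,
          show (PySem.Dict.ofList [((0:Int), s0), (1, s1), (2, s2)]).getD 2 0 = s2 from rfl,
          show wh + (t0 * s0 + t1 * s1 + t2 * s2) + w * s1
             = wh + (t0 * s0 + (t1 + w) * s1 + t2 * s2) from by ring,
          show ye + (t0 * s1 + t1 * s2 + t2 * s0) + w * s2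
             = ye + (t0 * s1 + (t1 + w) * s2 + t2 * s0) from by ring,
          show re + (t0 * s2 + t1 * s0 + t2 * s1) + w * s0
             = re + (t0 * s2 + (t1 + w) * s0 + t2 * s1) from by ring]
      exact ih (i + 1) t0 (t1 + w) t2 wh ye re s0 s1 s2

-- ===== VERDICT (by name: the statement is the Claim_ definition above) =====
theorem calculate_areas_spec : Claim_equal_calculate_areas := by
  intro w_list h_list _
  simp only [Spec_calculate_areas, calculate_areas, calculate_areas_alt]
  rw [pv_hloop_eq]
  simp only [List.getD_eq_getElem?_getD]
  have HW := pv_wloop_eq w_list 0 0 0 0 0 0 0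
    ((pvB_hloop [0, 0, 0] 0 h_list).getD 0 0)
    ((pvB_hloop [0, 0, 0] 0 h_list).getD 1 0)
    ((pvB_hloop [0, 0, 0] 0 h_list).getD 2 0)
  norm_num at HW
  rw [HW, show PySem.List.pyRange 0 3 1 = [0, 1, 2] from by decide]
  simp only [List.foldl]
  norm_num [PySem.List.pyGetD, show PySem.Int.mod (0 + 1) 3 = 1 from by decide,
            show PySem.Int.mod (0 + 2) 3 = 2 from by decide,
            show PySem.Int.mod (1 + 1) 3 = 2 from by decide,
            show PySem.Int.mod (1 + 2) 3 = 0 from by decide,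
            show PySem.Int.mod (2 + 1) 3 = 0 from by decide,
            show PySem.Int.mod (2 + 2) 3 = 1 from by decide,
            List.getD_eq_getElem?_getD]
  simp only [pv_get0, pv_get1, pv_get2]
  exact ⟨trivial, trivial, trivial⟩
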